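-- pv_equiv track=rewrite | github.com/Crone1/College-Python | Year Two - Semester One/Week 5/Arrange_list_for_balanced_tree.py | rec_make_list
-- ===== SOURCE A (Python) =====
-- def rec_make_list(lst, new_lst=None):
--     if new_lst == None:
--         new_lst = []
--
--     if len(lst) == 1:
--         new_lst.append(lst[0])
--
--     elif len(lst) == 2:
--         new_lst.append(lst[0])
--         new_lst.append(lst[1])
--
--     else:
--         middle = len(lst)//2
--         new_lst.append(lst[middle])
--
--         rec_make_list(lst[:middle], new_lst)
--         rec_make_list(lst[middle + 1:], new_lst)
--
--     return new_lst
-- ===== SOURCE B (Python) =====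
-- def rec_make_list(lst, new_lst=None):
--     if new_lst == None:
--         new_lst = []
--     stack = [(0, len(lst))]
--     while stack:
--         lo, hi = stack.pop()
--         n = hi - lo
--         if n == 1:
--             new_lst.append(lst[lo])
--         elif n == 2:
--             new_lst.append(lst[lo])
--             new_lst.append(lst[lo + 1])
--         else:
--             mid = lo + n // 2
--             new_lst.append(lst[mid])
--             stack.append((mid + 1, hi))
--             stack.append((lo, mid))
--     return new_lst
-- ===== Notes on version B (the rewrite author's own statement) =====
-- stated objective: alternative
-- what changed: Replaces A's recursion on freshly-built list slices with an iterative while-loop over an explicit stack of (lo, hi) index ranges into the original list (right range pushed before left to preserve preorder), so no intermediate slice copies are made.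
import Mathlib
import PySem

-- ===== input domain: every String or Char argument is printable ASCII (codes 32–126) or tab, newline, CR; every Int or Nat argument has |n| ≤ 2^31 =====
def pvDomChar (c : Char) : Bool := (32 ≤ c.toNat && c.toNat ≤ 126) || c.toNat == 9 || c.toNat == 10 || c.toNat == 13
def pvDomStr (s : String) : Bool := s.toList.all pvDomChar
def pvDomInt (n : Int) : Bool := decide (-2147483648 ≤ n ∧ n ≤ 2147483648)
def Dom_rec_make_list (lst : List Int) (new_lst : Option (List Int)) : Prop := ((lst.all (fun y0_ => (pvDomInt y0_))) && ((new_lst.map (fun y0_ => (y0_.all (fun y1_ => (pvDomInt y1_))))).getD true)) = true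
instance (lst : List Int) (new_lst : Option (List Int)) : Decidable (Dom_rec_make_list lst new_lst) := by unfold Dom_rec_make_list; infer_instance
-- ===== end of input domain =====

-- B replaces A's recursion on list slices by an iterative loop over an explicit stack of
-- index ranges (lo, hi) into the original list (objective: alternative decomposition, no
-- slice copies). A mutates the caller's new_lst in place; the equivalence proved here is
-- about the RETURN value only (B performs the same mutation in Python).

-- ===== PORT A =====
-- recursive body of A; `acc` is the (already defaulted) new_lst. All indices taken with
-- .getD are in range on every branch Python reaches, so .getD i 0 = Python's lst[i];
-- the length-0 guard marks exactly where Python raises IndexError (outside Pre_).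
def pvRecA (lst : List Int) (acc : List Int) : List Int :=
  if lst.length = 1 then acc ++ [lst.getD 0 0]
  else if lst.length = 2 then acc ++ [lst.getD 0 0, lst.getD 1 0]
  else if lst.length = 0 then acc   -- Python: IndexError (excluded by Pre_)
  else
    let m := lst.length / 2
    pvRecA (lst.drop (m + 1)) (pvRecA (lst.take m) (acc ++ [lst.getD m 0]))
termination_by lst.length
decreasing_by
  · simp only [List.length_take]; omega
  · simp only [List.length_drop]; omega

def rec_make_list (lst : List Int) (new_lst : Option (List Int)) : List Int :=
  pvRecA lst (new_lst.getD [])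

-- ===== PORT B =====
-- B's while-loop over the explicit stack of (lo, hi) ranges; stack top is the list head.
def pvLoopB (lst : List Int) (stack : List (Nat × Nat)) (acc : List Int) : List Int :=
  match stack with
  | [] => acc
  | (lo, hi) :: rest =>
    let n := hi - lo
    if n = 1 then pvLoopB lst rest (acc ++ [lst.getD lo 0])
    else if n = 2 then pvLoopB lst rest (acc ++ [lst.getD lo 0, lst.getD (lo + 1) 0])
    else if n = 0 then acc   -- Python: IndexError at lst[mid] (excluded by Pre_)
    else
      pvLoopB lst ((lo, lo + n / 2) :: (lo + n / 2 + 1, hi) :: rest)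
        (acc ++ [lst.getD (lo + n / 2) 0])
termination_by (stack.map (fun p => p.2 - p.1)).sum
decreasing_by
  · simp only [List.map_cons, List.sum_cons]; omega
  · simp only [List.map_cons, List.sum_cons]; omega
  · simp only [List.map_cons, List.sum_cons]; omega

def rec_make_list_alt (lst : List Int) (new_lst : Option (List Int)) : List Int :=
  pvLoopB lst [(0, lst.length)] (new_lst.getD [])

-- ===== PRECONDITION & SPEC =====
-- Pre_ excludes only the empty lst, on which both A and B raise IndexError.
def Pre_rec_make_list (lst : List Int) (new_lst : Option (List Int)) : Prop := lst ≠ []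
instance (lst : List Int) (new_lst : Option (List Int)) : Decidable (Pre_rec_make_list lst new_lst) := by unfold Pre_rec_make_list; infer_instance
def pvWitness_rec_make_list : List Int × Option (List Int) := ([1, 2, 3, 4, 5], some [9])

def Spec_rec_make_list (lst : List Int) (new_lst : Option (List Int)) (out : List Int) : Prop := out = rec_make_list_alt lst new_lst
instance (lst : List Int) (new_lst : Option (List Int)) (out : List Int) : Decidable (Spec_rec_make_list lst new_lst out) := by unfold Spec_rec_make_list; infer_instance

-- ===== CLAIM (what is proved, stated in full; the proofs are below) =====
def Claim_equal_rec_make_list : Prop := ∀ (lst : List Int) (new_lst : Option (List Int)), Dom_rec_make_list lst new_lst → Pre_rec_make_list lst new_lst → Spec_rec_make_list lst new_lst (rec_make_list lst new_lst)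

-- ===== LEMMAS AND PROOFS =====

-- indexing into a contiguous segment of lst equals indexing into lst
theorem pv_seg_getD (lst : List Int) (lo k j : Nat) (hj : j < k) (_hr : lo + j < lst.length) :
    ((lst.drop lo).take k).getD j 0 = lst.getD (lo + j) 0 := by
  simp [List.getD_eq_getElem?_getD, hj, List.getElem?_drop]

-- the segment of lst from lo (incl.) to hi (excl.)
theorem pv_seg_len (lst : List Int) (lo hi : Nat) (h : hi ≤ lst.length) :
    ((lst.drop lo).take (hi - lo)).length = hi - lo := by
  simp [List.length_take, List.length_drop]; omega

theorem pv_key (n : Nat) : ∀ (lst : List Int) (lo hi : Nat) (rest : List (Nat × Nat)) (acc : List Int),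
    hi - lo = n → 1 ≤ n → hi ≤ lst.length →
    pvLoopB lst ((lo, hi) :: rest) acc
      = pvLoopB lst rest (pvRecA ((lst.drop lo).take (hi - lo)) acc) := by
  induction n using Nat.strong_induction_on with
  | _ n ih =>
    intro lst lo hi rest acc hn h1 hlen
    have hseg := pv_seg_len lst lo hi hlen
    rw [pvLoopB, pvRecA]
    set seg := (lst.drop lo).take (hi - lo) with hsegdef
    simp only [hseg]
    by_cases e1 : hi - lo = 1
    · have g0 := pv_seg_getD lst lo (hi - lo) 0 (by omega) (by omega)
      rw [← hsegdef] at g0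
      simp only [List.getD_eq_getElem?_getD] at g0
      simp [e1, g0]
    · by_cases e2 : hi - lo = 2
      · have g0 := pv_seg_getD lst lo (hi - lo) 0 (by omega) (by omega)
        have g1 := pv_seg_getD lst lo (hi - lo) 1 (by omega) (by omega)
        rw [← hsegdef] at g0 g1
        simp only [List.getD_eq_getElem?_getD] at g0 g1
        simp [e2, g0, g1]
      · have e0 : ¬ hi - lo = 0 := by omega
        have gm := pv_seg_getD lst lo (hi - lo) ((hi - lo) / 2) (by omega) (by omega)
        rw [← hsegdef] at gm
        have hL : seg.take ((hi - lo) / 2)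
            = (lst.drop lo).take ((lo + (hi - lo) / 2) - lo) := by
          rw [hsegdef, List.take_take]; congr 1; omega
        have hR : seg.drop ((hi - lo) / 2 + 1)
            = (lst.drop (lo + (hi - lo) / 2 + 1)).take (hi - (lo + (hi - lo) / 2 + 1)) := by
          rw [hsegdef, List.drop_take, List.drop_drop]; congr 1; omega
        simp only [if_neg e1, if_neg e2, if_neg e0]
        rw [gm, hL, hR]
        rw [ih ((lo + (hi - lo) / 2) - lo) (by omega) lst lo (lo + (hi - lo) / 2) _ _ rfl
              (by omega) (by omega)]
        rw [ih (hi - (lo + (hi - lo) / 2 + 1)) (by omega) lst (lo + (hi - lo) / 2 + 1) hi rest _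
              rfl (by omega) (by omega)]

-- ===== VERDICT (by name: the statement is the Claim_ definition above) =====
theorem rec_make_list_spec : Claim_equal_rec_make_list := by
  intro lst new_lst _ hpre
  unfold Spec_rec_make_list rec_make_list rec_make_list_alt
  have hne : 1 ≤ lst.length := by
    cases lst with
    | nil => exact absurd rfl hpre
    | cons a t => simp
  rw [pv_key lst.length lst 0 lst.length [] (new_lst.getD []) (by omega) (by omega) le_rfl]
  simp [pvLoopB]
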